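-- pv_equiv track=rewrite | github.com/HanyangTechAI/2020_RL_Team01 | yahtzee/scoreboard.py | dices_to_straights
-- ===== SOURCE A (Python) =====
-- def dices_to_straights(dices):
--     dices = sorted(dices)
--     max_straight = 1
--     current_straight = 1
--     for i in range(1, len(dices)):
--         if dices[i] == dices[i - 1] + 1:
--             current_straight += 1
--             max_straight = max(current_straight, max_straight)
--         elif dices[i] == dices[i - 1]:
--             continue
--         else:
--             current_straight = 1
--     return max_straight
-- ===== SOURCE B (Python) =====
-- def dices_to_straights(dices):
--     values = set(dices)
--     best = 1
--     for v in values: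
--         if v - 1 not in values:
--             length = 1
--             while v + length in values:
--                 length += 1
--             best = max(best, length)
--     return best
-- ===== Notes on version B (the rewrite author's own statement) =====
-- stated objective: alternative
-- what changed: Replaces sort-then-adjacent-scan with a hash-set sweep: for each value whose predecessor is absent (a run start) count upward through the set and keep the best run length.
import Mathlib
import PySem

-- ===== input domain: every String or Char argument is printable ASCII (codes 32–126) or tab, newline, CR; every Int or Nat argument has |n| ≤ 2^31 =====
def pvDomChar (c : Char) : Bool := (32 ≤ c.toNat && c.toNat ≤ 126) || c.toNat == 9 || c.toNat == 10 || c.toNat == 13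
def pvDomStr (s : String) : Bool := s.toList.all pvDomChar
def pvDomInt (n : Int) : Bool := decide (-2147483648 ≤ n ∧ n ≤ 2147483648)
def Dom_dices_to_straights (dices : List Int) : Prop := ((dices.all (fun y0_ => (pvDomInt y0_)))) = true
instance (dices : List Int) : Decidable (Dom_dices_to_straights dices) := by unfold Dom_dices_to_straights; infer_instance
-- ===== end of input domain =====

-- B replaces A's sort + adjacent scan by a set sweep that counts each run upward
-- from its start (objective: alternative algorithm, no sorting).

-- ===== PORT A =====
-- the three-way branch of A's loop body (dices[i] vs dices[i-1])
def stepA (prev y : Int) (st : Int × Int) : Int × Int :=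
  if y = prev + 1 then (max (st.2 + 1) st.1, st.2 + 1)
  else if y = prev then st
  else (st.1, 1)

def dices_to_straights (dices : List Int) : Int :=
  let d := PySem.List.sorted dices (fun z => z) false
  ((PySem.List.pyRange 1 (d.length : Int) 1).foldl
    (fun st i => stepA (PySem.List.pyGetD d (i - 1) 0) (PySem.List.pyGetD d i 0) st)
    (1, 1)).1

-- ===== PORT B =====
-- the 'while v + length in values: length += 1' loop; fuel = |values| suffices,
-- since the counted values are distinct members of the set
def chainWhile (values : List Int) (v : Int) : Nat → Int → Int
  | 0, len => len
  | fuel + 1, len => if (v + len) ∈ values then chainWhile values v fuel (len + 1) else len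

def dices_to_straights_alt (dices : List Int) : Int :=
  let values := PySem.Set.ofList dices
  values.foldl
    (fun best v =>
      if (v - 1) ∉ values then max best (chainWhile values v values.length 1)
      else best)
    1

-- ===== PRECONDITION & SPEC =====
def Spec_dices_to_straights (dices : List Int) (out : Int) : Prop := out = dices_to_straights_alt dices
instance (dices : List Int) (out : Int) : Decidable (Spec_dices_to_straights dices out) := by unfold Spec_dices_to_straights; infer_instance

-- ===== CLAIM (what is proved, stated in full; the proofs are below) =====
def Claim_equal_dices_to_straights : Prop := ∀ (dices : List Int), Dom_dices_to_straights dices → Spec_dices_to_straights dices (dices_to_straights dices)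

-- ===== LEMMAS AND PROOFS =====

-- `goodUp l v k`: the k consecutive values v, v+1, …, v+k-1 all occur in l
def goodUp (l : List Int) (v : Int) (k : Nat) : Bool :=
  (List.range k).all (fun i => decide ((v + (i : Int)) ∈ l))

def goodDown (l : List Int) (v : Int) (k : Nat) : Bool :=
  (List.range k).all (fun i => decide ((v - (i : Int)) ∈ l))

def pvCard (l : List Int) : Nat := (PySem.Set.ofList l).length

-- length of the consecutive run upward from v / downward ending at v
def upRun (l : List Int) (v : Int) : Nat :=
  Nat.findGreatest (fun k => goodUp l v k = true) (pvCard l)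

def downRun (l : List Int) (v : Int) : Nat :=
  Nat.findGreatest (fun k => goodDown l v k = true) (pvCard l)

theorem goodUp_iff (l : List Int) (v : Int) (k : Nat) :
    goodUp l v k = true ↔ ∀ i : Nat, i < k → (v + (i : Int)) ∈ l := by
  simp [goodUp, List.all_eq_true, List.mem_range]

theorem goodDown_iff (l : List Int) (v : Int) (k : Nat) :
    goodDown l v k = true ↔ ∀ i : Nat, i < k → (v - (i : Int)) ∈ l := by
  simp [goodDown, List.all_eq_true, List.mem_range]

theorem goodUp_anti (l : List Int) (v : Int) {j k : Nat} (hjk : j ≤ k)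
    (h : goodUp l v k = true) : goodUp l v j = true := by
  rw [goodUp_iff] at h ⊢; exact fun i hi => h i (lt_of_lt_of_le hi hjk)

theorem goodDown_anti (l : List Int) (v : Int) {j k : Nat} (hjk : j ≤ k)
    (h : goodDown l v k = true) : goodDown l v j = true := by
  rw [goodDown_iff] at h ⊢; exact fun i hi => h i (lt_of_lt_of_le hi hjk)

theorem goodUp_one (l : List Int) (v : Int) (hv : v ∈ l) : goodUp l v 1 = true := by
  rw [goodUp_iff]; intro i hi
  interval_cases i; simpa using hv

theorem goodDown_one (l : List Int) (v : Int) (hv : v ∈ l) : goodDown l v 1 = true := by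
  rw [goodDown_iff]; intro i hi
  interval_cases i; simpa using hv

theorem goodUp_bound (l : List Int) (v : Int) (k : Nat) (h : goodUp l v k = true) :
    k ≤ pvCard l := by
  rw [goodUp_iff] at h
  have hnd : ((List.range k).map (fun i : Nat => v + (i : Int))).Nodup := by
    refine (List.nodup_range).map ?_
    intro a b hab
    have h2 : v + (a : Int) = v + (b : Int) := hab
    omega
  have hsub : ((List.range k).map (fun i : Nat => v + (i : Int))) ⊆ PySem.Set.ofList l := by
    intro x hx
    simp only [List.mem_map, List.mem_range] at hx
    obtain ⟨i, hi, rfl⟩ := hx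
    exact (PySem.Set.mem_ofList _ _).mpr (h i hi)
  have := (hnd.subperm hsub).length_le
  simpa [pvCard] using this

theorem goodDown_bound (l : List Int) (v : Int) (k : Nat) (h : goodDown l v k = true) :
    k ≤ pvCard l := by
  rw [goodDown_iff] at h
  have hnd : ((List.range k).map (fun i : Nat => v - (i : Int))).Nodup := by
    refine (List.nodup_range).map ?_
    intro a b hab
    have h2 : v - (a : Int) = v - (b : Int) := hab
    omega
  have hsub : ((List.range k).map (fun i : Nat => v - (i : Int))) ⊆ PySem.Set.ofList l := by
    intro x hx
    simp only [List.mem_map, List.mem_range] at hx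
    obtain ⟨i, hi, rfl⟩ := hx
    exact (PySem.Set.mem_ofList _ _).mpr (h i hi)
  have := (hnd.subperm hsub).length_le
  simpa [pvCard] using this

theorem card_pos (l : List Int) (v : Int) (hv : v ∈ l) : 1 ≤ pvCard l :=
  goodUp_bound l v 1 (goodUp_one l v hv)

theorem upRun_pos (l : List Int) (v : Int) (hv : v ∈ l) : 1 ≤ upRun l v :=
  Nat.le_findGreatest (card_pos l v hv) (goodUp_one l v hv)

theorem downRun_pos (l : List Int) (v : Int) (hv : v ∈ l) : 1 ≤ downRun l v :=
  Nat.le_findGreatest (card_pos l v hv) (goodDown_one l v hv)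

theorem upRun_good (l : List Int) (v : Int) (hv : v ∈ l) : goodUp l v (upRun l v) = true :=
  Nat.findGreatest_spec (P := fun k => goodUp l v k = true) (card_pos l v hv) (goodUp_one l v hv)

theorem downRun_good (l : List Int) (v : Int) (hv : v ∈ l) :
    goodDown l v (downRun l v) = true :=
  Nat.findGreatest_spec (P := fun k => goodDown l v k = true) (card_pos l v hv) (goodDown_one l v hv)

theorem downRun_not (l : List Int) (v : Int) : ¬ goodDown l v (downRun l v + 1) = true := by
  intro h
  have hb := goodDown_bound l v _ h
  exact Nat.findGreatest_is_greatest (Nat.lt_succ_self _) hb h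

theorem upRun_eq_of (l : List Int) (v : Int) (k : Nat) (hv : v ∈ l)
    (hg : goodUp l v k = true) (hn : ¬ goodUp l v (k + 1) = true) : upRun l v = k := by
  have hk : k ≤ upRun l v := Nat.le_findGreatest (goodUp_bound l v k hg) hg
  rcases lt_or_eq_of_le hk with h | h
  · exact absurd (goodUp_anti l v h (upRun_good l v hv)) hn
  · omega

theorem downRun_eq_of (l : List Int) (v : Int) (k : Nat) (hv : v ∈ l)
    (hg : goodDown l v k = true) (hn : ¬ goodDown l v (k + 1) = true) : downRun l v = k := by
  have hk : k ≤ downRun l v := Nat.le_findGreatest (goodDown_bound l v k hg) hg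
  rcases lt_or_eq_of_le hk with h | h
  · exact absurd (goodDown_anti l v h (downRun_good l v hv)) hn
  · omega

theorem goodDown_succ (l : List Int) (v : Int) (k : Nat) :
    goodDown l v (k + 1) = true ↔ v ∈ l ∧ goodDown l (v - 1) k = true := by
  rw [goodDown_iff, goodDown_iff]
  constructor
  · intro h
    refine ⟨by simpa using h 0 (by omega), fun i hi => ?_⟩
    have := h (i + 1) (by omega)
    have hc : v - ((i + 1 : Nat) : Int) = (v - 1) - (i : Int) := by push_cast; ring
    rwa [hc] at this
  · rintro ⟨h0, h⟩ i hi
    match i with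
    | 0 => simpa using h0
    | Nat.succ j =>
      have := h j (by omega)
      have hc : v - ((j + 1 : Nat) : Int) = (v - 1) - (j : Int) := by push_cast; ring
      rw [hc]; exact this

theorem downRun_step (l : List Int) (v : Int) (hv : v ∈ l) (hv1 : v - 1 ∈ l) :
    downRun l v = downRun l (v - 1) + 1 := by
  apply downRun_eq_of l v _ hv
  · exact (goodDown_succ l v _).mpr ⟨hv, downRun_good l (v - 1) hv1⟩
  · intro h
    exact downRun_not l (v - 1) ((goodDown_succ l v _).mp h).2

theorem downRun_one (l : List Int) (v : Int) (hv : v ∈ l) (hv1 : v - 1 ∉ l) :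
    downRun l v = 1 := by
  apply downRun_eq_of l v _ hv (goodDown_one l v hv)
  intro h
  have := ((goodDown_succ l v 1).mp h).2
  rw [goodDown_iff] at this
  exact hv1 (by simpa using this 0 (by omega))

-- every run ending at v extends a run start w with upRun w ≥ downRun v
theorem exists_start (l : List Int) (v : Int) (hv : v ∈ l) :
    ∃ w, w ∈ l ∧ w - 1 ∉ l ∧ downRun l v ≤ upRun l w := by
  set d := downRun l v with hd
  have hd1 : 1 ≤ d := downRun_pos l v hv
  have hgood := downRun_good l v hv
  rw [goodDown_iff] at hgood
  refine ⟨v - ((d : Int) - 1), ?_, ?_, ?_⟩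
  · have := hgood (d - 1) (by omega)
    have hc : ((d - 1 : Nat) : Int) = (d : Int) - 1 := by omega
    rwa [hc] at this
  · intro hmem
    apply downRun_not l v
    rw [goodDown_iff]
    intro i hi
    rcases Nat.lt_or_ge i d with h | h
    · exact hgood i h
    · have hieq : i = d := by omega
      have hc : v - ((d : Int) - 1) - 1 = v - (i : Int) := by rw [hieq]; ring
      rwa [hc] at hmem
  · have hup : goodUp l (v - ((d : Int) - 1)) d = true := by
      rw [goodUp_iff]
      intro i hi
      have := hgood (d - 1 - i) (by omega)
      have hc : v - ((d - 1 - i : Nat) : Int) = v - ((d : Int) - 1) + (i : Int) := by omega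
      rwa [hc] at this
    exact Nat.le_findGreatest (goodUp_bound l _ d hup) hup

-- every run starting at v ends at some x with downRun x ≥ upRun v
theorem exists_end (l : List Int) (v : Int) (hv : v ∈ l) :
    ∃ x, x ∈ l ∧ upRun l v ≤ downRun l x := by
  set u := upRun l v with hu
  have hu1 : 1 ≤ u := upRun_pos l v hv
  have hgood := upRun_good l v hv
  rw [goodUp_iff] at hgood
  refine ⟨v + ((u : Int) - 1), ?_, ?_⟩
  · have := hgood (u - 1) (by omega)
    have hc : ((u - 1 : Nat) : Int) = (u : Int) - 1 := by omega
    rwa [hc] at this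
  · have hdown : goodDown l (v + ((u : Int) - 1)) u = true := by
      rw [goodDown_iff]
      intro i hi
      have := hgood (u - 1 - i) (by omega)
      have hc : v + ((u - 1 - i : Nat) : Int) = v + ((u : Int) - 1) - (i : Int) := by omega
      rwa [hc] at this
    exact Nat.le_findGreatest (goodDown_bound l _ u hdown) hdown

-- ---------- A side ----------

-- structural form of A's index loop
def scanA (prev : Int) (st : Int × Int) : List Int → Int × Int
  | [] => st
  | y :: t => scanA y (stepA prev y st) t

theorem foldA_eq_scanA (d : List Int) :
    ∀ (n a : Nat) (st : Int × Int) (h1 : 1 ≤ a) (ha : a ≤ d.length), d.length - a = n →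
    (PySem.List.pyRange (a : Int) (d.length : Int) 1).foldl
      (fun st i => stepA (PySem.List.pyGetD d (i - 1) 0) (PySem.List.pyGetD d i 0) st) st
    = scanA (d[a - 1]'(by omega)) st (d.drop a) := by
  intro n
  induction n with
  | zero =>
    intro a st h1 ha hn
    have haa : a = d.length := by omega
    rw [PySem.List.pyRange_one_eq_nil (by omega)]
    simp [scanA, haa, List.drop_length]
  | succ m ih =>
    intro a st h1 ha hn
    have hlt : (a : Int) < (d.length : Int) := by omega
    rw [PySem.List.pyRange_one_cons hlt]
    simp only [List.foldl_cons]
    have hg1 : PySem.List.pyGetD d ((a : Int) - 1) 0 = d[a - 1]'(by omega) := by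
      have hc : (a : Int) - 1 = ((a - 1 : Nat) : Int) := by omega
      rw [hc, PySem.List.pyGetD_natCast]
      exact List.getD_eq_getElem d 0 (by omega)
    have hg2 : PySem.List.pyGetD d (a : Int) 0 = d[a]'(by omega) := by
      rw [PySem.List.pyGetD_natCast]
      exact List.getD_eq_getElem d 0 (by omega)
    have hdrop : d.drop a = d[a]'(by omega) :: d.drop (a + 1) := by
      rw [List.drop_eq_getElem_cons (by omega)]
    have hcast : (a : Int) + 1 = ((a + 1 : Nat) : Int) := by omega
    rw [hg1, hg2, hdrop, hcast]
    have := ih (a + 1) (stepA (d[a - 1]'(by omega)) (d[a]'(by omega)) st) (by omega) (by omega) (by omega)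
    rw [this]
    simp [scanA]

-- the running maximum over the downRun values of a suffix
def bumpD (l : List Int) (es : List Int) (m : Int) : Int :=
  es.foldl (fun acc e => max acc ((downRun l e : Nat) : Int)) m

theorem bumpD_cons (l : List Int) (e : Int) (t : List Int) (m : Int) :
    bumpD l (e :: t) m = bumpD l t (max m ((downRun l e : Nat) : Int)) := rfl

theorem bumpD_init_le (l : List Int) (es : List Int) (m : Int) : m ≤ bumpD l es m := by
  induction es generalizing m with
  | nil => simp [bumpD]
  | cons e t ih =>
    rw [bumpD_cons]
    exact le_trans (le_max_left _ _) (ih _)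

theorem bumpD_mem_le (l : List Int) (e : Int) :
    ∀ (es : List Int) (m : Int), e ∈ es → ((downRun l e : Nat) : Int) ≤ bumpD l es m := by
  intro es
  induction es with
  | nil => intro m he; simp at he
  | cons e' t ih =>
    intro m he
    rw [bumpD_cons]
    rcases List.mem_cons.mp he with h | h
    · subst h; exact le_trans (le_max_right _ _) (bumpD_init_le _ _ _)
    · exact ih _ h

theorem bumpD_le (l : List Int) (c : Int) :
    ∀ (es : List Int) (m : Int), m ≤ c → (∀ e ∈ es, ((downRun l e : Nat) : Int) ≤ c) →
    bumpD l es m ≤ c := by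
  intro es
  induction es with
  | nil => intro m hm _; simpa [bumpD] using hm
  | cons e t ih =>
    intro m hm h
    rw [bumpD_cons]
    exact ih _ (max_le hm (h e (List.mem_cons_self))) (fun x hx => h x (List.mem_cons_of_mem _ hx))

theorem scanA_fst (l : List Int) :
    ∀ (rest pre : List Int) (x : Int) (maxS : Int),
    PySem.List.sorted l (fun z => z) false = pre ++ x :: rest →
    ((downRun l x : Nat) : Int) ≤ maxS →
    (scanA x (maxS, ((downRun l x : Nat) : Int)) rest).1 = bumpD l rest maxS := by
  intro rest
  induction rest with
  | nil => intro pre x maxS _ _; simp [scanA, bumpD]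
  | cons y t ih =>
    intro pre x maxS hd hle
    have hxl : x ∈ l := by
      have : x ∈ PySem.List.sorted l (fun z => z) false := by rw [hd]; simp
      rwa [PySem.List.mem_sorted] at this
    have hyl : y ∈ l := by
      have : y ∈ PySem.List.sorted l (fun z => z) false := by rw [hd]; simp
      rwa [PySem.List.mem_sorted] at this
    have hpw : (pre ++ x :: y :: t).Pairwise (fun a b : Int => a ≤ b) := by
      have := PySem.List.sorted_pairwise l (fun z => z) (κ := Int)
      rw [hd] at this
      simpa using this
    have hxy : x ≤ y := by
      have := (List.pairwise_append.mp hpw).2.1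
      exact (List.pairwise_cons.mp this).1 y (by simp)
    simp only [scanA]
    by_cases hy1 : y = x + 1
    · have hdy : downRun l y = downRun l x + 1 := by
        have : y - 1 = x := by omega
        rw [downRun_step l y hyl (by rwa [this]), this]
      have hstep : stepA x y (maxS, ((downRun l x : Nat) : Int)) =
          (max ((downRun l y : Nat) : Int) maxS, ((downRun l y : Nat) : Int)) := by
        simp only [stepA, if_pos hy1, hdy]
        push_cast
        rfl
      rw [hstep]
      have hd' : PySem.List.sorted l (fun z => z) false = (pre ++ [x]) ++ y :: t := by
        rw [hd]; simp
      rw [ih (pre ++ [x]) y _ hd' (le_max_left _ _)]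
      rw [bumpD_cons, max_comm]
    · by_cases hy0 : y = x
      · have hdy : downRun l y = downRun l x := by rw [hy0]
        have hstep : stepA x y (maxS, ((downRun l x : Nat) : Int)) =
            (maxS, ((downRun l y : Nat) : Int)) := by
          have hne : y ≠ x + 1 := by omega
          simp only [stepA, if_neg hne, if_pos hy0, hdy]
        rw [hstep]
        have hd' : PySem.List.sorted l (fun z => z) false = (pre ++ [x]) ++ y :: t := by
          rw [hd]; simp
        rw [ih (pre ++ [x]) y _ hd' (by rwa [hdy])]
        rw [bumpD_cons, max_eq_left (by rwa [hdy])]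
      · -- gap: y > x + 1, so y - 1 is not in l and the run restarts at 1
        have hgap : x + 1 < y := by
          rcases lt_or_eq_of_le hxy with h | h
          · omega
          · exact absurd h.symm hy0
        have hy1m : y - 1 ∉ l := by
          intro hmem
          have hmem' : y - 1 ∈ pre ++ x :: y :: t := by
            rw [← hd, PySem.List.mem_sorted]; exact hmem
          rcases List.mem_append.mp hmem' with h | h
          · have := (List.pairwise_append.mp hpw).2.2 _ h x (by simp)
            omega
          · rcases List.mem_cons.mp h with h | h
            · omega
            · rcases List.mem_cons.mp h with h | h
              · omega
              · have hpw2 := (List.pairwise_append.mp hpw).2.1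
                have := (List.pairwise_cons.mp (List.pairwise_cons.mp hpw2).2).1 _ h
                omega
        have hdy : downRun l y = 1 := downRun_one l y hyl hy1m
        have hone : (1 : Int) ≤ maxS := by
          have := downRun_pos l x hxl
          have hcast : (1 : Int) ≤ ((downRun l x : Nat) : Int) := by exact_mod_cast this
          exact le_trans hcast hle
        have hstep : stepA x y (maxS, ((downRun l x : Nat) : Int)) =
            (maxS, ((downRun l y : Nat) : Int)) := by
          have hne1 : y ≠ x + 1 := by omega
          have hne0 : y ≠ x := by omega
          simp only [stepA, if_neg hne1, if_neg hne0, hdy]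
          norm_num
        rw [hstep]
        have hd' : PySem.List.sorted l (fun z => z) false = (pre ++ [x]) ++ y :: t := by
          rw [hd]; simp
        rw [ih (pre ++ [x]) y _ hd' (by rw [hdy]; exact_mod_cast hone)]
        rw [bumpD_cons, max_eq_left (by rw [hdy]; exact_mod_cast hone)]

theorem A_eq_bumpD (l : List Int) :
    dices_to_straights l = bumpD l (PySem.List.sorted l (fun z => z) false) 1 := by
  have hA : dices_to_straights l =
      ((PySem.List.pyRange 1 (((PySem.List.sorted l (fun z => z) false).length : Nat) : Int) 1).foldl
        (fun st i => stepA (PySem.List.pyGetD (PySem.List.sorted l (fun z => z) false) (i - 1) 0)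
          (PySem.List.pyGetD (PySem.List.sorted l (fun z => z) false) i 0) st) (1, 1)).1 := rfl
  rw [hA]
  cases hd : PySem.List.sorted l (fun z => z) false with
  | nil =>
    simp only [List.length_nil, Nat.cast_zero]
    rw [PySem.List.pyRange_one_eq_nil (by omega)]
    simp [bumpD]
  | cons x0 rest =>
    have hlen : 1 ≤ (x0 :: rest).length := by simp
    have := foldA_eq_scanA (x0 :: rest) ((x0 :: rest).length - 1) 1 (1, 1) (by omega) hlen rfl
    simp only [Nat.cast_one] at this
    rw [this]
    have hx0l : x0 ∈ l := by
      have : x0 ∈ PySem.List.sorted l (fun z => z) false := by rw [hd]; simp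
      rwa [PySem.List.mem_sorted] at this
    have hx0m : x0 - 1 ∉ l := by
      intro hmem
      have := PySem.List.key_head_sorted_le l (fun z => z) hd (x0 - 1) hmem
      simp at this
    have hdx0 : downRun l x0 = 1 := downRun_one l x0 hx0l hx0m
    have hst : ((1 : Int), (1 : Int)) = (1, ((downRun l x0 : Nat) : Int)) := by
      rw [hdx0]; norm_num
    simp only [Nat.sub_self, List.getElem_cons_zero, List.drop_succ_cons, List.drop_zero]
    rw [hst, scanA_fst l rest [] x0 1 (by simpa using hd) (by rw [hdx0]; norm_num)]
    rw [bumpD_cons, hdx0]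
    norm_num

-- ---------- B side ----------

theorem chainWhile_eq (l : List Int) (v : Int) (hv : v ∈ l) :
    ∀ (fuel len : Nat), 1 ≤ len → goodUp l v len = true → pvCard l ≤ len + fuel →
    chainWhile (PySem.Set.ofList l) v fuel ((len : Nat) : Int) = ((upRun l v : Nat) : Int) := by
  intro fuel
  induction fuel with
  | zero =>
    intro len h1 hg hc
    simp only [chainWhile]
    have : upRun l v = len := by
      apply upRun_eq_of l v len hv hg
      intro h
      have := goodUp_bound l v (len + 1) h
      omega
    rw [this]
  | succ m ih =>
    intro len h1 hg hc
    simp only [chainWhile]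
    by_cases hmem : v + ((len : Nat) : Int) ∈ PySem.Set.ofList l
    · rw [if_pos hmem]
      have hmem' : v + ((len : Nat) : Int) ∈ l := (PySem.Set.mem_ofList _ _).mp hmem
      have hg' : goodUp l v (len + 1) = true := by
        rw [goodUp_iff] at hg ⊢
        intro i hi
        rcases Nat.lt_or_ge i len with h | h
        · exact hg i h
        · have : i = len := by omega
          subst this; exact hmem'
      have hcast : ((len : Nat) : Int) + 1 = (((len + 1 : Nat)) : Int) := by push_cast; ring
      rw [hcast]
      exact ih (len + 1) (by omega) hg' (by omega)
    · rw [if_neg hmem]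
      have hmem' : v + ((len : Nat) : Int) ∉ l := fun h => hmem ((PySem.Set.mem_ofList _ _).mpr h)
      have : upRun l v = len := by
        apply upRun_eq_of l v len hv hg
        intro h
        rw [goodUp_iff] at h
        exact hmem' (h len (by omega))
      rw [this]

-- the running maximum over B's loop on a suffix of the set
def bumpB (l : List Int) (es : List Int) (m : Int) : Int :=
  es.foldl
    (fun best v =>
      if (v - 1) ∉ PySem.Set.ofList l then
        max best (chainWhile (PySem.Set.ofList l) v (PySem.Set.ofList l).length 1)
      else best)
    m

theorem B_eq_bumpB (l : List Int) :
    dices_to_straights_alt l = bumpB l (PySem.Set.ofList l) 1 := rfl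

theorem chain_body_eq (l : List Int) (v : Int) (hv : v ∈ l) :
    chainWhile (PySem.Set.ofList l) v (PySem.Set.ofList l).length 1
      = ((upRun l v : Nat) : Int) := by
  have := chainWhile_eq l v hv (pvCard l) 1 (by omega) (goodUp_one l v hv) (by omega)
  simpa [pvCard] using this

theorem bumpB_cons (l : List Int) (e : Int) (t : List Int) (m : Int) :
    bumpB l (e :: t) m = bumpB l t
      (if (e - 1) ∉ PySem.Set.ofList l then
        max m (chainWhile (PySem.Set.ofList l) e (PySem.Set.ofList l).length 1)
      else m) := rfl

theorem bumpB_init_le (l : List Int) (es : List Int) (m : Int) : m ≤ bumpB l es m := by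
  induction es generalizing m with
  | nil => simp [bumpB]
  | cons e t ih =>
    rw [bumpB_cons]
    split
    · exact le_trans (le_max_left _ _) (ih _)
    · exact ih _

theorem bumpB_mem_le (l : List Int) (v : Int) (hvl : v ∈ l) (hstart : v - 1 ∉ l) :
    ∀ (es : List Int) (m : Int), v ∈ es → ((upRun l v : Nat) : Int) ≤ bumpB l es m := by
  intro es
  induction es with
  | nil => intro m hv; simp at hv
  | cons e t ih =>
    intro m hv
    rw [bumpB_cons]
    rcases List.mem_cons.mp hv with h | h
    · subst h
      have hnot : (v - 1) ∉ PySem.Set.ofList l := fun h => hstart ((PySem.Set.mem_ofList _ _).mp h)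
      rw [if_pos hnot, chain_body_eq l v hvl]
      exact le_trans (le_max_right _ _) (bumpB_init_le _ _ _)
    · exact ih _ h

theorem bumpB_le (l : List Int) (c : Int) :
    ∀ (es : List Int) (m : Int), m ≤ c → (∀ v ∈ es, v ∈ l) →
    (∀ v ∈ es, v - 1 ∉ l → ((upRun l v : Nat) : Int) ≤ c) → bumpB l es m ≤ c := by
  intro es
  induction es with
  | nil => intro m hm _ _; simpa [bumpB] using hm
  | cons e t ih =>
    intro m hm hes h
    rw [bumpB_cons]
    have hel : e ∈ l := hes e (List.mem_cons_self)
    refine ih _ ?_ (fun x hx => hes x (List.mem_cons_of_mem _ hx))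
      (fun x hx hx1 => h x (List.mem_cons_of_mem _ hx) hx1)
    split
    · rename_i hnot
      have hstart : e - 1 ∉ l := fun hh => hnot ((PySem.Set.mem_ofList _ _).mpr hh)
      rw [chain_body_eq l e hel]
      exact max_le hm (h e (List.mem_cons_self) hstart)
    · exact hm

-- ===== VERDICT (by name: the statement is the Claim_ definition above) =====
theorem dices_to_straights_spec : Claim_equal_dices_to_straights := by
  intro l _
  unfold Spec_dices_to_straights
  apply le_antisymm
  · -- A ≤ B
    rw [A_eq_bumpD, B_eq_bumpB]
    apply bumpD_le l _ _ _
    · exact bumpB_init_le l _ 1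
    · intro e he
      have hel : e ∈ l := (PySem.List.mem_sorted _ _ _ _).mp he
      obtain ⟨w, hwl, hw1, hle⟩ := exists_start l e hel
      have hws : w ∈ PySem.Set.ofList l := (PySem.Set.mem_ofList _ _).mpr hwl
      calc ((downRun l e : Nat) : Int) ≤ ((upRun l w : Nat) : Int) := by exact_mod_cast hle
        _ ≤ bumpB l (PySem.Set.ofList l) 1 := bumpB_mem_le l w hwl hw1 _ 1 hws
  · -- B ≤ A
    rw [A_eq_bumpD, B_eq_bumpB]
    apply bumpB_le l _ _ _
    · exact bumpD_init_le l _ 1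
    · intro v hv; exact (PySem.Set.mem_ofList _ _).mp hv
    · intro v hv _
      have hvl : v ∈ l := (PySem.Set.mem_ofList _ _).mp hv
      obtain ⟨x, hxl, hle⟩ := exists_end l v hvl
      have hxs : x ∈ PySem.List.sorted l (fun z => z) false :=
        (PySem.List.mem_sorted _ _ _ _).mpr hxl
      calc ((upRun l v : Nat) : Int) ≤ ((downRun l x : Nat) : Int) := by exact_mod_cast hle
        _ ≤ bumpD l (PySem.List.sorted l (fun z => z) false) 1 := bumpD_mem_le l x _ 1 hxs
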